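-- pv_equiv track=rewrite | github.com/kunigaku/eem | utils/6_make_station_element_latlng.py | make_location_dictionary
-- ===== SOURCE A (Python) =====
-- def make_location_dictionary(locations):
--     ret = {}
--     location_list = locations['stations']
--     for record in location_list:
--         if ret.get(record['name']) is None:
--             ret[record['name']] = []
--         ret[record['name']].append(record)
--     return ret
-- ===== SOURCE B (Python) =====
-- def make_location_dictionary(locations):
--     stations = locations['stations']
--     names = list(dict.fromkeys(record['name'] for record in stations))
--     return {name: [record for record in stations if record['name'] == name]
--             for name in names}
-- ===== Notes on version B (the rewrite author's own statement) =====
-- stated objective: idiomatic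
-- what changed: Replaces the single-pass incremental dict-building loop (get, create-empty-list, append) by a two-pass strategy: ordered-dedup the names with dict.fromkeys, then build the result as a dict comprehension that filters the station list per name.
import Mathlib
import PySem

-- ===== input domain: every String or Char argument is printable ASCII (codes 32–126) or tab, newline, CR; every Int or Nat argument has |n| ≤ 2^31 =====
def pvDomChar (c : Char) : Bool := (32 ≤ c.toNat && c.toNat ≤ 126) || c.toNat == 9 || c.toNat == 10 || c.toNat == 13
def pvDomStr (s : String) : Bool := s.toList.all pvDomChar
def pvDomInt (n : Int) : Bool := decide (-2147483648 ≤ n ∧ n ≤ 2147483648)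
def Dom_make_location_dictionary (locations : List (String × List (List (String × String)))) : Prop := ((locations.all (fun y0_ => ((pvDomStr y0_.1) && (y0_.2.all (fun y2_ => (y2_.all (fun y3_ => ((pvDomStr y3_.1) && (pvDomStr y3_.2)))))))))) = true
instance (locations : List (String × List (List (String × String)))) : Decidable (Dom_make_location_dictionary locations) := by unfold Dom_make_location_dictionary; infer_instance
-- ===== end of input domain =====

-- B differs from A only in decomposition; Pre_ excludes exactly the inputs where both Pythons raise KeyError.

-- ===== PORT A =====
-- record['name']  (first match in the record's association list; Pre_ guarantees it exists)
def pvName (record : List (String × String)) : String :=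
  ((PySem.Dict.mk record).get? "name").getD ""

def make_location_dictionary (locations : List (String × List (List (String × String)))) : List (String × List (List (String × String))) :=
  let location_list := ((PySem.Dict.mk locations).get? "stations").getD []
  (location_list.foldl (fun ret record =>
      let ret := if (ret.get? (pvName record)) = none
                 then ret.insert (pvName record) [] else ret
      ret.modify (pvName record) [] (fun l => l ++ [record]))
    PySem.Dict.empty).items

-- ===== PORT B =====
def make_location_dictionary_alt (locations : List (String × List (List (String × String)))) : List (String × List (List (String × String))) :=
  let stations := ((PySem.Dict.mk locations).get? "stations").getD []
  let names := PySem.List.dedup (stations.map pvName)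
  names.map (fun name => (name, stations.filter (fun record => pvName record == name)))

-- ===== PRECONDITION & SPEC =====
-- Pre_ excludes exactly the inputs on which Python A raises KeyError ('stations' key missing,
-- or some station record without a 'name' key); Python B raises there too.
def Pre_make_location_dictionary (locations : List (String × List (List (String × String)))) : Prop :=
  ((PySem.Dict.mk locations).get? "stations").isSome = true ∧
  ∀ record ∈ ((PySem.Dict.mk locations).get? "stations").getD [],
    ((PySem.Dict.mk record).get? "name").isSome = true
instance (locations : List (String × List (List (String × String)))) : Decidable (Pre_make_location_dictionary locations) := by unfold Pre_make_location_dictionary; infer_instance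

def pvWitness_make_location_dictionary : (List (String × List (List (String × String)))) :=
  [("stations", [[("name", "a"), ("line", "L1")], [("name", "b")], [("name", "a")]])]

def Spec_make_location_dictionary (locations : List (String × List (List (String × String)))) (out : List (String × List (List (String × String)))) : Prop := out = make_location_dictionary_alt locations
instance (locations : List (String × List (List (String × String)))) (out : List (String × List (List (String × String)))) : Decidable (Spec_make_location_dictionary locations out) := by unfold Spec_make_location_dictionary; infer_instance

-- ===== CLAIM (what is proved, stated in full; the proofs are below) =====
def Claim_equal_make_location_dictionary : Prop := ∀ (locations : List (String × List (List (String × String)))), Dom_make_location_dictionary locations → Pre_make_location_dictionary locations → Spec_make_location_dictionary locations (make_location_dictionary locations)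

-- ===== LEMMAS AND PROOFS =====

-- A's loop body (ensure key, then append) is the single modify step, dict by dict.
lemma stepA_eq_modify (d : PySem.Dict String (List (List (String × String)))) (r : List (String × String)) :
    (let d' := if (d.get? (pvName r)) = none then d.insert (pvName r) [] else d
     d'.modify (pvName r) [] (fun l => l ++ [r]))
    = d.modify (pvName r) [] (fun l => l ++ [r]) := by
  by_cases h : d.get? (pvName r) = none
  · rw [if_pos h]
    simp only [PySem.Dict.modify, PySem.Dict.insert_insert_self,
      PySem.Dict.getD_insert_self, PySem.Dict.getD_of_get?_eq_none d [] h]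
  · simp [h]

-- The fold of the modify step, as items.
lemma foldA_items (sts : List (List (String × String))) :
    ((sts.foldl (fun d r => d.modify (pvName r) [] (fun l => l ++ [r])) PySem.Dict.empty).items)
    = (PySem.List.dedup (sts.map pvName)).map
        (fun name => (name, sts.filter (fun r => pvName r == name))) := by
  set D := sts.foldl (fun d r => d.modify (pvName r) [] (fun l => l ++ [r])) PySem.Dict.empty with hD
  have hkeys : D.keys = PySem.List.dedup (sts.map pvName) := by
    rw [hD, PySem.Dict.keys_foldl_modify_key (key := pvName)]
    simp [PySem.Set.update, PySem.Set.ofList_eq_foldl, PySem.Dict.keys_empty, List.foldl_map]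
  have hnd : D.keys.Nodup := by
    rw [hkeys]; exact PySem.List.nodup_dedup _
  have hget : ∀ c, D.getD c [] = sts.filter (fun r => pvName r == c) := by
    intro c
    have hmap : D = (sts.map (fun r => (pvName r, r))).foldl
        (fun d p => d.modify p.1 [] (fun l => l ++ [p.2])) PySem.Dict.empty := by
      rw [hD, List.foldl_map]
    rw [hmap, PySem.Dict.getD_foldl_modify_append]
    simp [List.filter_map, Function.comp_def]
  calc D.items = D.keys.map (fun k => (k, D.getD k [])) :=
        PySem.Dict.items_eq_map_keys D hnd []
    _ = (PySem.List.dedup (sts.map pvName)).map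
          (fun name => (name, sts.filter (fun r => pvName r == name))) := by
        rw [hkeys]; exact List.map_congr_left (fun k _ => by rw [hget k])

-- ===== VERDICT (by name: the statement is the Claim_ definition above) =====
theorem make_location_dictionary_spec : Claim_equal_make_location_dictionary := by
  intro locations _ _
  unfold Spec_make_location_dictionary make_location_dictionary make_location_dictionary_alt
  set sts := ((PySem.Dict.mk locations).get? "stations").getD []
  have hfold : sts.foldl (fun ret record =>
      (if (ret.get? (pvName record)) = none
       then ret.insert (pvName record) [] else ret).modify (pvName record) [] (fun l => l ++ [record]))
      PySem.Dict.empty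
    = sts.foldl (fun d r => d.modify (pvName r) [] (fun l => l ++ [r])) PySem.Dict.empty := by
    exact PySem.List.foldl_congr_mem _ _ _ _ (fun d r hr => stepA_eq_modify d r)
  simp only [hfold]
  exact foldA_items sts
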